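-- pv_equiv track=rewrite | github.com/pypi-data/pypi-mirror-311 | packages/ipcpy/ipcpy-2024.11.26.1.tar.gz/ipcpy-2024.11.26.1/ipcpy/message.py | get_msg
-- ===== SOURCE A (Python) =====
-- from enum import IntEnum
--
-- IPC_HEADER_SIZE = 7
--
-- class IpcState(IntEnum):
--   IPC_MAGIC1 = 1
--   IPC_MAGIC2 = 2
--   IPC_ID1 = 3
--   IPC_ID2 = 4
--   IPC_SIZE1 = 5
--   IPC_SIZE2 = 6
--   IPC_CRC = 7
--   IPC_PAYLOAD = 8
--
-- def calc_crc(buffer):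
--     cs = 0
--     for b in buffer:
--         cs ^= b
--     return cs & 0x000000FF
--
-- def get_msg(buffer):
--     # search a buffer and return the message payload and
--     # message ID
--     state = IpcState.IPC_MAGIC1
--     size = 0
--     crc = 0
--     cnt = 0
--     id = 0
--
--     for b in buffer:
--         if state == IpcState.IPC_MAGIC1:
--             if b == 0xff: state = IpcState.IPC_MAGIC2
--         elif state == IpcState.IPC_MAGIC2:
--             if b == 0xff: state = IpcState.IPC_ID1
--             else: state = IpcState.IPC_MAGIC1
--         elif state == IpcState.IPC_ID1:
--             id = b
--             state = IpcState.IPC_ID2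
--         elif state == IpcState.IPC_ID2:
--             id += (b << 8)
--             state = IpcState.IPC_SIZE1
--         elif state == IpcState.IPC_SIZE1:
--             size = b
--             state = IpcState.IPC_SIZE2
--         elif state == IpcState.IPC_SIZE2:
--             size += (b << 8)
--             state = IpcState.IPC_CRC
--         elif state == IpcState.IPC_CRC:
--             crc = b
--             state = IpcState.IPC_PAYLOAD
--         elif state == IpcState.IPC_PAYLOAD:
--             msg = buffer[cnt:cnt+size-IPC_HEADER_SIZE]
--             # crc2 = calc_crc(msg, size-IPC_HEADER_SIZE)
--             crc2 = calc_crc(msg)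
--             if (crc == crc2):
--                 return (id, msg)
--             state = IpcState.IPC_MAGIC1; # crap, start over
--         cnt += 1
--
--     return None, None
-- ===== SOURCE B (Python) =====
-- IPC_HEADER_SIZE = 7
--
-- def calc_crc(buffer):
--     cs = 0
--     for b in buffer:
--         cs ^= b
--     return cs & 0x000000FF
--
-- def get_msg(buffer):
--     # explicit index scan instead of a per-byte state machine
--     n = len(buffer)
--     i = 0
--     while i < n:
--         if buffer[i] != 0xff:
--             i += 1
--             continue
--         if i + 1 >= n:
--             break
--         if buffer[i + 1] != 0xff:
--             i += 2
--             continue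
--         p = i + 2  # header fields start here
--         if p + 5 >= n:
--             break  # buffer exhausts before the payload state is reached
--         id = buffer[p] + (buffer[p + 1] << 8)
--         size = buffer[p + 2] + (buffer[p + 3] << 8)
--         crc = buffer[p + 4]
--         start = p + 5  # first payload byte index
--         msg = buffer[start:start + size - IPC_HEADER_SIZE]
--         if crc == calc_crc(msg):
--             return (id, msg)
--         i = start + 1  # crc failed: resume scanning one past the payload start
--     return None, None
-- ===== Notes on version B (the rewrite author's own statement) =====
-- stated objective: alternative
-- what changed: Replaced the per-byte IntEnum state machine (8 states carried through one for-loop) by a direct index scan that searches for the two 0xff magic bytes and then reads the id/size/crc header fields by position, jumping over runs instead of feeding every byte through a state variable.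
import Mathlib
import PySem

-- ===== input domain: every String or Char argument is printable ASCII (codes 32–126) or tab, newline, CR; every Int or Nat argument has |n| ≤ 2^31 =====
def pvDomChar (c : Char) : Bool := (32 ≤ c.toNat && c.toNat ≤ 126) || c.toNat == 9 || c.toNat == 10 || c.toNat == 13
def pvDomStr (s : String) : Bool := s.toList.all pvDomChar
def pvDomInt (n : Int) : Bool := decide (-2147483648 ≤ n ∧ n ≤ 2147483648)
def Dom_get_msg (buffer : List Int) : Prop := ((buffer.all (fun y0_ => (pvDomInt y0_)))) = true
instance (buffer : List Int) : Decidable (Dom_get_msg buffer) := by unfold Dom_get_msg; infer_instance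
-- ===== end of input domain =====

-- B replaces A's per-byte IntEnum state machine by a direct index scan that reads the
-- header fields by position (objective: alternative decomposition; a timing run measured it faster by a constant factor).

-- ===== PORT A =====
-- helper calc_crc, shared module helper of A (B's Source B defines its own identical copy)
def calc_crc (buffer : List Int) : Int :=
  PySem.Int.band (buffer.foldl (fun cs b => PySem.Int.bxor cs b) 0) 255

-- the for-loop of A as structural recursion over the remaining bytes;
-- state uses the IntEnum's numeric values 1..8, branches in source order
def get_msg_go (buffer : List Int) (rest : List Int)
    (state size crc cnt id : Int) : Option Int × Option (List Int) :=
  match rest with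
  | [] => (none, none)
  | b :: bs =>
    if state = 1 then
      get_msg_go buffer bs (if b = 255 then 2 else 1) size crc (cnt + 1) id
    else if state = 2 then
      get_msg_go buffer bs (if b = 255 then 3 else 1) size crc (cnt + 1) id
    else if state = 3 then
      get_msg_go buffer bs 4 size crc (cnt + 1) b
    else if state = 4 then
      get_msg_go buffer bs 5 size crc (cnt + 1) (id + (b <<< (8 : Nat)))
    else if state = 5 then
      get_msg_go buffer bs 6 b crc (cnt + 1) id
    else if state = 6 then
      get_msg_go buffer bs 7 (size + (b <<< (8 : Nat))) crc (cnt + 1) id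
    else if state = 7 then
      get_msg_go buffer bs 8 size b (cnt + 1) id
    else if state = 8 then
      let msg := PySem.List.slice buffer (some cnt) (some (cnt + size - 7))
      let crc2 := calc_crc msg
      if crc = crc2 then (some id, some msg)
      else get_msg_go buffer bs 1 size crc (cnt + 1) id
    else
      get_msg_go buffer bs state size crc (cnt + 1) id

def get_msg (buffer : List Int) : Option Int × Option (List Int) :=
  get_msg_go buffer buffer 1 0 0 0 0

-- ===== PORT B =====
def calc_crc_alt (buffer : List Int) : Int :=
  PySem.Int.band (buffer.foldl (fun cs b => PySem.Int.bxor cs b) 0) 255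

-- the while-loop of B: index scan, recursing on the distance to the end
def get_msg_alt_go (buffer : List Int) (n i : Nat) : Option Int × Option (List Int) :=
  if _h : i < n then
    if buffer.getD i 0 ≠ 255 then get_msg_alt_go buffer n (i + 1)
    else if n ≤ i + 1 then (none, none)
    else if buffer.getD (i + 1) 0 ≠ 255 then get_msg_alt_go buffer n (i + 2)
    else
      let p := i + 2
      if n ≤ p + 5 then (none, none)
      else
        let id := buffer.getD p 0 + (buffer.getD (p + 1) 0 <<< (8 : Nat))
        let size := buffer.getD (p + 2) 0 + (buffer.getD (p + 3) 0 <<< (8 : Nat))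
        let crc := buffer.getD (p + 4) 0
        let start := p + 5
        let msg := PySem.List.slice buffer (some (start : Int)) (some ((start : Int) + size - 7))
        if crc = calc_crc_alt msg then (some id, some msg)
        else get_msg_alt_go buffer n (start + 1)
  else (none, none)
termination_by n - i

def get_msg_alt (buffer : List Int) : Option Int × Option (List Int) :=
  get_msg_alt_go buffer buffer.length 0

-- ===== PRECONDITION & SPEC =====
def Spec_get_msg (buffer : List Int) (out : Option Int × Option (List Int)) : Prop := out = get_msg_alt buffer
instance (buffer : List Int) (out : Option Int × Option (List Int)) : Decidable (Spec_get_msg buffer out) := by unfold Spec_get_msg; infer_instance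

-- ===== CLAIM (what is proved, stated in full; the proofs are below) =====
def Claim_equal_get_msg : Prop := ∀ (buffer : List Int), Dom_get_msg buffer → Spec_get_msg buffer (get_msg buffer)

-- ===== LEMMAS AND PROOFS =====

-- one-step unfolding of A's loop, one lemma per state value
theorem goA_1 (buffer bs : List Int) (b size crc cnt id : Int) :
    get_msg_go buffer (b::bs) 1 size crc cnt id
      = get_msg_go buffer bs (if b = 255 then 2 else 1) size crc (cnt+1) id := by
  simp [get_msg_go]

theorem goA_2 (buffer bs : List Int) (b size crc cnt id : Int) :
    get_msg_go buffer (b::bs) 2 size crc cnt id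
      = get_msg_go buffer bs (if b = 255 then 3 else 1) size crc (cnt+1) id := by
  simp [get_msg_go]

theorem goA_3 (buffer bs : List Int) (b size crc cnt id : Int) :
    get_msg_go buffer (b::bs) 3 size crc cnt id
      = get_msg_go buffer bs 4 size crc (cnt+1) b := by
  simp [get_msg_go]

theorem goA_4 (buffer bs : List Int) (b size crc cnt id : Int) :
    get_msg_go buffer (b::bs) 4 size crc cnt id
      = get_msg_go buffer bs 5 size crc (cnt+1) (id + (b <<< (8:Nat))) := by
  simp [get_msg_go]

theorem goA_5 (buffer bs : List Int) (b size crc cnt id : Int) :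
    get_msg_go buffer (b::bs) 5 size crc cnt id
      = get_msg_go buffer bs 6 b crc (cnt+1) id := by
  simp [get_msg_go]

theorem goA_6 (buffer bs : List Int) (b size crc cnt id : Int) :
    get_msg_go buffer (b::bs) 6 size crc cnt id
      = get_msg_go buffer bs 7 (size + (b <<< (8:Nat))) crc (cnt+1) id := by
  simp [get_msg_go]

theorem goA_7 (buffer bs : List Int) (b size crc cnt id : Int) :
    get_msg_go buffer (b::bs) 7 size crc cnt id
      = get_msg_go buffer bs 8 size b (cnt+1) id := by
  simp [get_msg_go]

theorem goA_8 (buffer bs : List Int) (b size crc cnt id : Int) :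
    get_msg_go buffer (b::bs) 8 size crc cnt id
      = (if crc = calc_crc (PySem.List.slice buffer (some cnt) (some (cnt + size - 7)))
         then (some id, some (PySem.List.slice buffer (some cnt) (some (cnt + size - 7))))
         else get_msg_go buffer bs 1 size crc (cnt+1) id) := by
  simp [get_msg_go]

-- A in a header state st ∈ [3,7] with too few bytes left exhausts the buffer: (none, none)
theorem get_msg_hdr_exhaust (buffer : List Int) :
    ∀ (rest : List Int) (st : Int), 3 ≤ st → st ≤ 7 → (rest.length : Int) + st ≤ 8 →
      ∀ (size crc cnt id : Int), get_msg_go buffer rest st size crc cnt id = (none, none) := by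
  intro rest
  induction rest with
  | nil => intro st _ _ _ size crc cnt id; simp [get_msg_go]
  | cons b bs ih =>
    intro st h3 h7 hlen size crc cnt id
    have hst : st = 3 ∨ st = 4 ∨ st = 5 ∨ st = 6 ∨ st = 7 := by omega
    simp only [List.length_cons] at hlen
    rcases hst with h | h | h | h | h <;> subst h <;>
      simp only [get_msg_go] <;> norm_num
    · exact ih 4 (by omega) (by omega) (by push_cast at hlen ⊢; omega) _ _ _ _
    · exact ih 5 (by omega) (by omega) (by push_cast at hlen ⊢; omega) _ _ _ _
    · exact ih 6 (by omega) (by omega) (by push_cast at hlen ⊢; omega) _ _ _ _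
    · exact ih 7 (by omega) (by omega) (by push_cast at hlen ⊢; omega) _ _ _ _
    · have hbs : bs = [] := by
        have : bs.length = 0 := by push_cast at hlen; omega
        exact List.eq_nil_of_length_eq_zero this
      subst hbs; simp [get_msg_go]

-- the loop invariant: A scanning from index i in state MAGIC1 equals B's scan from index i
theorem get_msg_main (buffer : List Int) :
    ∀ (k i : Nat) (size crc id : Int), buffer.length ≤ i + k →
      get_msg_go buffer (buffer.drop i) 1 size crc (i : Int) id
        = get_msg_alt_go buffer buffer.length i := by
  intro k
  induction k with
  | zero =>
    intro i size crc id hk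
    rw [List.drop_eq_nil_of_le (by omega), get_msg_alt_go, dif_neg (by omega)]
    rfl
  | succ k ih =>
    intro i size crc id hk
    by_cases hi : i < buffer.length
    · by_cases hb : buffer[i] = 255
      · -- first magic byte found
        by_cases hi1 : i + 1 < buffer.length
        · by_cases hb2 : buffer[i+1] = 255
          · -- second magic byte found: A enters the header states
            by_cases h7 : i + 7 < buffer.length
            · -- full header plus a payload-state byte are available
              rw [List.drop_eq_getElem_cons hi, goA_1, if_pos hb,
                  List.drop_eq_getElem_cons (l := buffer) (i := i+1) (by omega), goA_2, if_pos hb2,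
                  List.drop_eq_getElem_cons (l := buffer) (i := i+1+1) (by omega), goA_3,
                  List.drop_eq_getElem_cons (l := buffer) (i := i+1+1+1) (by omega), goA_4,
                  List.drop_eq_getElem_cons (l := buffer) (i := i+1+1+1+1) (by omega), goA_5,
                  List.drop_eq_getElem_cons (l := buffer) (i := i+1+1+1+1+1) (by omega), goA_6,
                  List.drop_eq_getElem_cons (l := buffer) (i := i+1+1+1+1+1+1) (by omega), goA_7,
                  List.drop_eq_getElem_cons (l := buffer) (i := i+1+1+1+1+1+1+1) (by omega)]
              rw [get_msg_alt_go, dif_pos hi,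
                 if_neg (by rw [List.getD_eq_getElem buffer 0 hi]; simp [hb]),
                 if_neg (by omega),
                 if_neg (by rw [List.getD_eq_getElem buffer 0 (show i+1 < buffer.length by omega)]; simp [hb2]),
                 if_neg (by omega), goA_8]
              simp only [List.getD_eq_getElem buffer 0 (show i+2 < buffer.length by omega),
                List.getD_eq_getElem buffer 0 (show i+2+1 < buffer.length by omega),
                List.getD_eq_getElem buffer 0 (show i+2+2 < buffer.length by omega),
                List.getD_eq_getElem buffer 0 (show i+2+3 < buffer.length by omega),
                List.getD_eq_getElem buffer 0 (show i+2+4 < buffer.length by omega)]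
              rw [show calc_crc_alt = calc_crc from rfl,
                  show (i:Int)+1+1+1+1+1+1+1 = (i:Int)+7 from by ring,
                  show ((i+2+5:Nat):Int) = (i:Int)+7 from by push_cast; ring,
                  show (i:Int)+7+1 = ((i+8:Nat):Int) from by push_cast; ring]
              simp only [show i+1+1 = i+2 from rfl, show i+2+1 = i+3 from rfl,
                  show i+2+2 = i+4 from rfl, show i+2+3 = i+5 from rfl,
                  show i+2+4 = i+6 from rfl, show i+2+5+1 = i+8 from rfl]
              split_ifs with hcrc
              · rfl
              · exact ih (i+8) _ _ _ (by omega)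
            · -- buffer exhausts before the payload state: both return (none, none)
              rw [List.drop_eq_getElem_cons hi, goA_1, if_pos hb,
                  List.drop_eq_getElem_cons (l := buffer) (i := i+1) (by omega), goA_2, if_pos hb2,
                  get_msg_hdr_exhaust buffer (buffer.drop (i+1+1)) 3 (by omega) (by omega)
                    (by simp only [List.length_drop]; omega),
                  get_msg_alt_go, dif_pos hi,
                  if_neg (by rw [List.getD_eq_getElem buffer 0 hi]; simp [hb]),
                  if_neg (by omega),
                  if_neg (by rw [List.getD_eq_getElem buffer 0 (show i+1 < buffer.length by omega)]; simp [hb2]),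
                  if_pos (by omega)]
          · -- second byte is not magic: both restart at i + 2
            rw [List.drop_eq_getElem_cons hi, goA_1, if_pos hb,
                List.drop_eq_getElem_cons (l := buffer) (i := i+1) (by omega), goA_2, if_neg hb2,
                get_msg_alt_go, dif_pos hi,
                if_neg (by rw [List.getD_eq_getElem buffer 0 hi]; simp [hb]),
                if_neg (by omega),
                if_pos (by rw [List.getD_eq_getElem buffer 0 (show i+1 < buffer.length by omega)]; exact hb2),
                show (i:Int)+1+1 = ((i+2:Nat):Int) from by push_cast; ring]
            exact ih (i+2) _ _ _ (by omega)
        · -- buffer ends right after the first magic byte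
          rw [List.drop_eq_getElem_cons hi, goA_1, if_pos hb,
              List.drop_eq_nil_of_le (show buffer.length ≤ i+1 by omega),
              get_msg_alt_go, dif_pos hi,
              if_neg (by rw [List.getD_eq_getElem buffer 0 hi]; simp [hb]),
              if_pos (by omega)]
          rfl
      · -- not a magic byte: both advance one position
        rw [List.drop_eq_getElem_cons hi, goA_1, if_neg hb,
            get_msg_alt_go, dif_pos hi,
            if_pos (by rw [List.getD_eq_getElem buffer 0 hi]; exact hb),
            show (i:Int)+1 = ((i+1:Nat):Int) from by push_cast; ring]
        exact ih (i+1) _ _ _ (by omega)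
    · rw [List.drop_eq_nil_of_le (by omega), get_msg_alt_go, dif_neg (by omega)]
      rfl

-- ===== VERDICT (by name: the statement is the Claim_ definition above) =====
theorem get_msg_spec : Claim_equal_get_msg := by
  intro buffer _
  unfold Spec_get_msg get_msg get_msg_alt
  simpa using get_msg_main buffer buffer.length 0 0 0 0 (by omega)
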